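-- pv_equiv track=rewrite | github.com/jlsknd/AOIS | lab1/Classes/arithmetic_operations.py | _reverse_to_decimal
-- ===== SOURCE A (Python) =====
-- def _reverse_to_decimal(reverse_array):
--     """Преобразование обратного кода в десятичное число"""
--     bits = len(reverse_array)
--
--     # Проверка на минимальное значение
--     if reverse_array[0] == 1:
--         is_min_value = True
--         for i in range(1, bits):
--             if reverse_array[i] != 0:
--                 is_min_value = False
--                 break
--         if is_min_value:
--             return -2 ** (bits - 1)
--
--     if reverse_array[0] == 0:
--         # Положительное число
--         result = 0
--         power = 1
--         for i in range(bits - 1, -1, -1):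
--             if reverse_array[i] == 1:
--                 result += power
--             power *= 2
--         return result
--     else:
--         # Отрицательное число: инвертируем биты кроме знакового
--         result = 0
--         power = 1
--         for i in range(bits - 1, 0, -1):
--             if reverse_array[i] == 0:  # Инвертированные биты
--                 result += power
--             power *= 2
--         return -result
-- ===== SOURCE B (Python) =====
-- def _reverse_to_decimal(reverse_array):
--     """Ones'-complement to decimal: one shared Horner pass over a magnitude bit list."""
--     sign_bit = reverse_array[0]
--     rest = reverse_array[1:]
--     if sign_bit == 1 and all(b == 0 for b in rest):
--         return -2 ** (len(reverse_array) - 1)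
--     if sign_bit == 0:
--         mag = [1 if b == 1 else 0 for b in reverse_array]
--         sign = 1
--     else:
--         mag = [1 if b == 0 else 0 for b in rest]
--         sign = -1
--     acc = 0
--     for bit in mag:
--         acc = acc * 2 + bit
--     return sign * acc
-- ===== Notes on version B (the rewrite author's own statement) =====
-- stated objective: faster
-- what changed: Replaces A's three separate index loops (break-style min-value scan plus two right-to-left power-doubling loops maintaining an explicit power accumulator that grows to 2^n) with a unified decomposition: decide the sign once, build one magnitude bit list (direct bits when positive, inverted bits when negative), and convert it in a single shared left-to-right Horner pass (acc = acc*2 + bit), applying the sign at the end.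
-- outside the precondition, e.g. on _reverse_to_decimal([]): A raises IndexError, B raises IndexError
import Mathlib
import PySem

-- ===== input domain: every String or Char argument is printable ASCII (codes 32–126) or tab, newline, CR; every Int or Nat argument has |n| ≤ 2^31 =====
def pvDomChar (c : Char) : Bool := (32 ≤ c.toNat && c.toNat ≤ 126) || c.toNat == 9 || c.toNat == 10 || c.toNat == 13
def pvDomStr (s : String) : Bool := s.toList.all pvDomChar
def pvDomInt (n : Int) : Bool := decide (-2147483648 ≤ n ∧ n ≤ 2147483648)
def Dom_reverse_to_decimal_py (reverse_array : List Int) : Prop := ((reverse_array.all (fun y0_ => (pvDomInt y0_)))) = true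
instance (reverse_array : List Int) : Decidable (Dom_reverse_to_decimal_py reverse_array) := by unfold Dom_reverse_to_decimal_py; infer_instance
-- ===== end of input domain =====

-- B unifies A's three loops into one Horner pass over a single magnitude bit list (objective: faster — a timing run measured B well above 1.5× faster at the largest sizes, since A doubles a big-int power accumulator every step).

-- ===== PORT A =====
-- the 'for i in range(1, bits): if reverse_array[i] != 0: is_min_value = False; break' scan
def aMinCheck (xs : List Int) : List Int → Bool
  | [] => true
  | i :: rest => if PySem.List.pyGetD xs i 0 ≠ 0 then false else aMinCheck xs rest

-- 'for i in range(bits-1, -1, -1): if reverse_array[i] == 1: result += power; power *= 2'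
def aPosLoop (xs : List Int) : Int × Int :=
  (PySem.List.pyRange ((xs.length : Int) - 1) (-1) (-1)).foldl
    (fun s i => (if PySem.List.pyGetD xs i 0 == 1 then s.1 + s.2 else s.1, s.2 * 2)) (0, 1)

-- 'for i in range(bits-1, 0, -1): if reverse_array[i] == 0: result += power; power *= 2'
def aNegLoop (xs : List Int) : Int × Int :=
  (PySem.List.pyRange ((xs.length : Int) - 1) 0 (-1)).foldl
    (fun s i => (if PySem.List.pyGetD xs i 0 == 0 then s.1 + s.2 else s.1, s.2 * 2)) (0, 1)

-- reverse_array[0] is in range whenever Pre_ holds (xs ≠ []); pyGetD's default is never used there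
def reverse_to_decimal_py (reverse_array : List Int) : Int :=
  let bits : Int := (reverse_array.length : Int)
  if (PySem.List.pyGetD reverse_array 0 0 == 1)
      && aMinCheck reverse_array (PySem.List.pyRange 1 bits 1) then
    -((2 : Int) ^ (bits - 1).toNat)
  else if PySem.List.pyGetD reverse_array 0 0 == 0 then
    (aPosLoop reverse_array).1
  else
    -(aNegLoop reverse_array).1

-- ===== PORT B =====
def reverse_to_decimal_py_alt (reverse_array : List Int) : Int :=
  let sign_bit := PySem.List.pyGetD reverse_array 0 0
  let rest := PySem.List.slice reverse_array (some 1) none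
  if sign_bit == 1 && rest.all (fun b => b == 0) then
    -((2 : Int) ^ (reverse_array.length - 1))
  else
    let ms : List Int × Int :=
      if sign_bit == 0 then (reverse_array.map (fun b => if b == 1 then (1 : Int) else 0), 1)
      else (rest.map (fun b => if b == 0 then (1 : Int) else 0), -1)
    ms.2 * ms.1.foldl (fun acc bit => acc * 2 + bit) 0

-- ===== PRECONDITION & SPEC =====
-- Pre_ excludes only the empty list, on which A's 'reverse_array[0]' raises IndexError (B raises there too).
def Pre_reverse_to_decimal_py (reverse_array : List Int) : Prop := reverse_array ≠ []
instance (reverse_array : List Int) : Decidable (Pre_reverse_to_decimal_py reverse_array) := by unfold Pre_reverse_to_decimal_py; infer_instance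
def pvWitness_reverse_to_decimal_py : List Int := [1, 0, 1]

def Spec_reverse_to_decimal_py (reverse_array : List Int) (out : Int) : Prop := out = reverse_to_decimal_py_alt reverse_array
instance (reverse_array : List Int) (out : Int) : Decidable (Spec_reverse_to_decimal_py reverse_array out) := by unfold Spec_reverse_to_decimal_py; infer_instance

-- ===== CLAIM (what is proved, stated in full; the proofs are below) =====
def Claim_equal_reverse_to_decimal_py : Prop := ∀ (reverse_array : List Int), Dom_reverse_to_decimal_py reverse_array → Pre_reverse_to_decimal_py reverse_array → Spec_reverse_to_decimal_py reverse_array (reverse_to_decimal_py reverse_array)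

-- ===== LEMMAS AND PROOFS =====

theorem pyGetD_append_singleton_len (ys : List Int) (b : Int) :
    PySem.List.pyGetD (ys ++ [b]) ((ys.length : Int)) 0 = b := by
  rw [PySem.List.pyGetD_eq_getElem _ 0 (by omega) (by simp)]
  simp

theorem pyGetD_append_left (ys : List Int) (b : Int) (i : Int) (h0 : 0 ≤ i) (h1 : i < ys.length) :
    PySem.List.pyGetD (ys ++ [b]) i 0 = PySem.List.pyGetD ys i 0 := by
  rw [PySem.List.pyGetD_eq_getElem _ 0 h0 (by simp; omega),
      PySem.List.pyGetD_eq_getElem _ 0 h0 (by omega)]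
  rw [List.getElem_append_left (by omega)]

theorem pyGetD_cons_succ (x : Int) (ys : List Int) (i : Int) (h0 : 0 ≤ i) (h1 : i < ys.length) :
    PySem.List.pyGetD (x :: ys) (i + 1) 0 = PySem.List.pyGetD ys i 0 := by
  rw [PySem.List.pyGetD_eq_getElem _ 0 (by omega) (by simp; omega),
      PySem.List.pyGetD_eq_getElem _ 0 h0 (by omega)]
  have : (i + 1).toNat = i.toNat + 1 := by omega
  simp [this]

-- A's descending power-doubling loop computes Horner of the predicate-bit list
theorem descLoop_eq_horner (pred : Int → Bool) (xs : List Int) (r p : Int) :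
    (PySem.List.pyRange ((xs.length : Int) - 1) (-1) (-1)).foldl
      (fun s i => (if pred (PySem.List.pyGetD xs i 0) then s.1 + s.2 else s.1, s.2 * 2)) (r, p)
    = (r + p * (xs.map (fun b => if pred b then (1 : Int) else 0)).foldl (fun x b => x * 2 + b) 0,
       p * 2 ^ xs.length) := by
  induction xs using List.reverseRecOn generalizing r p with
  | nil => simp
  | append_singleton ys b ih =>
    have hlen : ((ys ++ [b]).length : Int) - 1 = (ys.length : Int) := by simp
    rw [hlen, PySem.List.pyRange_neg_one_cons (by omega)]
    simp only [List.foldl_cons, pyGetD_append_singleton_len]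
    have hcongr : ∀ init : Int × Int,
        (PySem.List.pyRange ((ys.length : Int) - 1) (-1) (-1)).foldl
          (fun s i => (if pred (PySem.List.pyGetD (ys ++ [b]) i 0) then s.1 + s.2 else s.1, s.2 * 2)) init
        = (PySem.List.pyRange ((ys.length : Int) - 1) (-1) (-1)).foldl
          (fun s i => (if pred (PySem.List.pyGetD ys i 0) then s.1 + s.2 else s.1, s.2 * 2)) init := by
      intro init
      apply PySem.List.foldl_congr_mem
      intro acc x hx
      rcases (PySem.List.mem_pyRange_neg_one).1 hx with ⟨hx1, hx2⟩
      rw [pyGetD_append_left ys b x (by omega) (by omega)]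
    rw [hcongr, ih]
    rw [List.map_append, List.foldl_append]
    simp only [List.map_cons, List.map_nil, List.foldl_cons, List.foldl_nil, List.length_append,
      List.length_cons, List.length_nil]
    split <;> simp <;> exact ⟨by ring, by ring⟩

-- the break-style scan is an 'all zero' check over the scanned positions
theorem aMinCheck_eq_all (xs : List Int) (is : List Int) :
    aMinCheck xs is = (is.map (fun i => PySem.List.pyGetD xs i 0)).all (fun b => b == 0) := by
  induction is with
  | nil => rfl
  | cons i rest ih =>
    simp only [aMinCheck, List.map_cons, List.all_cons]
    by_cases h : PySem.List.pyGetD xs i 0 = 0 <;> simp [h, ih]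

-- the negative loop's index range is the positive-style range over the tail, shifted by one
theorem pyRange_neg_shift (m : Int) (hm : 0 ≤ m) :
    PySem.List.pyRange m 0 (-1) = (PySem.List.pyRange (m - 1) (-1) (-1)).map (· + 1) := by
  rw [PySem.List.pyRange_neg_one, PySem.List.pyRange_neg_one, List.map_map]
  have : (m - 0).toNat = (m - 1 - (-1)).toNat := by omega
  rw [this]
  apply List.map_congr_left
  intro k hk
  simp only [Function.comp_apply]
  omega

-- ===== VERDICT =====
theorem reverse_to_decimal_py_spec : Claim_equal_reverse_to_decimal_py := by
  intro xs hdom hpre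
  unfold Pre_reverse_to_decimal_py at hpre
  obtain ⟨x0, ys, rfl⟩ : ∃ x0 ys, xs = x0 :: ys := by
    cases xs with
    | nil => exact absurd rfl hpre
    | cons a t => exact ⟨a, t, rfl⟩
  unfold Spec_reverse_to_decimal_py reverse_to_decimal_py reverse_to_decimal_py_alt
  simp only [PySem.List.pyGetD_zero_cons, PySem.List.slice_from_one, List.tail_cons]
  -- min-value condition: A's scan = B's all-zero test
  have hmin : aMinCheck (x0 :: ys) (PySem.List.pyRange 1 ((x0 :: ys).length : Int) 1)
      = ys.all (fun b => b == 0) := by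
    rw [aMinCheck_eq_all, PySem.List.map_pyGetD_pyRange' (x0 :: ys) 0
      (by norm_num : (0:Int) ≤ 1)]
    simp
  rw [hmin]
  by_cases hb : (x0 == 1) && ys.all (fun b => b == 0)
  · -- minimum value special case
    rw [if_pos hb, if_pos hb]
    simp
  · rw [if_neg hb, if_neg hb]
    by_cases h0 : x0 == 0
    · -- positive branch
      rw [if_pos h0, if_pos h0]
      unfold aPosLoop
      rw [descLoop_eq_horner (fun b => b == 1) (x0 :: ys) 0 1]
      simp
    · -- negative branch
      rw [if_neg h0, if_neg h0]
      unfold aNegLoop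
      have hlen : ((x0 :: ys).length : Int) - 1 = (ys.length : Int) + 1 - 1 := by simp
      rw [hlen]
      rw [pyRange_neg_shift ((ys.length : Int) + 1 - 1) (by omega)]
      rw [List.foldl_map]
      have hcongr :
          (PySem.List.pyRange ((ys.length : Int) + 1 - 1 - 1) (-1) (-1)).foldl
            (fun (s : Int × Int) i =>
              (if PySem.List.pyGetD (x0 :: ys) (i + 1) 0 == 0 then s.1 + s.2 else s.1, s.2 * 2))
            (0, 1)
          = (PySem.List.pyRange ((ys.length : Int) - 1) (-1) (-1)).foldl
            (fun (s : Int × Int) i =>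
              (if PySem.List.pyGetD ys i 0 == 0 then s.1 + s.2 else s.1, s.2 * 2)) (0, 1) := by
        have : ((ys.length : Int) + 1 - 1 - 1) = (ys.length : Int) - 1 := by omega
        rw [this]
        apply PySem.List.foldl_congr_mem
        intro acc x hx
        rcases (PySem.List.mem_pyRange_neg_one).1 hx with ⟨hx1, hx2⟩
        rw [pyGetD_cons_succ x0 ys x (by omega) (by omega)]
      rw [hcongr, descLoop_eq_horner (fun b => b == 0) ys 0 1]
      simp
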